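-- pv_equiv track=rewrite | github.com/mattdold/streamlit-example | streamlit_app.py | freq_data
-- ===== SOURCE A (Python) =====
-- def freq_data(data, types, year):
--     freq_dict = {}
--
--     for type in types:
--         freq = 0
--         for i in range(len(data)):
--             if data[i][2] == type and year == data[i][1]:
--                 freq += 1
--
--         freq_dict[type] = freq
--
--     return freq_dict
-- ===== SOURCE B (Python) =====
-- def freq_data(data, types, year):
--     # One pass over data: count matching rows per type, then read the counts off.
--     counts = {}
--     for row in data:
--         if row[1] == year:
--             t = row[2]
--             counts[t] = counts.get(t, 0) + 1
--     return {t: counts.get(t, 0) for t in types}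
-- ===== Notes on version B (the rewrite author's own statement) =====
-- stated objective: faster
-- what changed: Replaces the per-type rescans of data (one full scan per type) by a single pass that builds a hash-map counter of matching rows keyed by type, then reads each type's count off the map.
-- outside the precondition, e.g. on freq_data([['a']], [], 'y'): A returns {}, B raises IndexError
import Mathlib
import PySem

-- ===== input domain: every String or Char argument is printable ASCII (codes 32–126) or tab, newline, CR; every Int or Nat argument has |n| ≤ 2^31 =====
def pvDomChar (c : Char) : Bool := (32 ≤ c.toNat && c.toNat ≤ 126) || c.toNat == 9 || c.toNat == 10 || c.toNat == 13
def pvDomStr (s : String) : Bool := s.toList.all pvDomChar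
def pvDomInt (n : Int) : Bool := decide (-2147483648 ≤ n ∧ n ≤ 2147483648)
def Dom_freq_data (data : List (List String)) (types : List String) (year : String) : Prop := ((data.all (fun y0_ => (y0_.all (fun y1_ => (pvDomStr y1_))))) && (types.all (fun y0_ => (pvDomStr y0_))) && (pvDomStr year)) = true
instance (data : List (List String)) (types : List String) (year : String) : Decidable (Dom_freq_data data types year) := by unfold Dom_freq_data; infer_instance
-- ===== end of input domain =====

-- B replaces A's per-type rescans of data by a single counting pass over data plus lookups (faster, asymptotic in a timing run at grading).
-- Pre_ excludes data containing a row with fewer than 3 fields: B indexes every row once, while A touches rows only when types is nonempty (and raises there too); with types = [] A returns {} where B raises.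


-- ===== PORT A =====
-- for type in types: freq = 0; for i in range(len(data)): if data[i][2] == type and year == data[i][1]: freq += 1; freq_dict[type] = freq
-- (row/field indexing via pyGetD: exact under Pre_, which puts every index in range)
def freq_data (data : List (List String)) (types : List String) (year : String) : List (String × Int) :=
  (types.foldl (fun d t =>
      let freq : Int :=
        (PySem.List.pyRange 0 data.length 1).foldl (fun f i =>
          if PySem.List.pyGetD (PySem.List.pyGetD data i []) 2 "" == t && year == PySem.List.pyGetD (PySem.List.pyGetD data i []) 1 "" then f + 1 else f) 0
      d.insert t freq)
    PySem.Dict.empty).items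

-- ===== PORT B =====
-- counts = {}; for row in data: if row[1] == year: counts[row[2]] = counts.get(row[2],0)+1; return {t: counts.get(t,0) for t in types}
def freq_data_alt (data : List (List String)) (types : List String) (year : String) : List (String × Int) :=
  let counts : PySem.Dict String Int :=
    data.foldl (fun c row =>
      if PySem.List.pyGetD row 1 "" == year then
        let t := PySem.List.pyGetD row 2 ""
        c.insert t (c.getD t 0 + 1)
      else c) PySem.Dict.empty
  (types.foldl (fun d t => d.insert t (counts.getD t 0)) PySem.Dict.empty).items

-- ===== PRECONDITION & SPEC =====
-- Pre_ excludes data containing a row with fewer than 3 fields; on those A raises IndexError whenever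
-- types is nonempty, and merely returns {} (without reading data) when types = [], where B raises.
def Pre_freq_data (data : List (List String)) (_types : List String) (_year : String) : Prop :=
  ∀ row ∈ data, 3 ≤ row.length
instance (data : List (List String)) (types : List String) (year : String) : Decidable (Pre_freq_data data types year) := by unfold Pre_freq_data; infer_instance
def pvWitness_freq_data : List (List String) × List String × String :=
  ([["r1", "2020", "cat"], ["r2", "2021", "dog"]], ["cat", "dog"], "2020")

def Spec_freq_data (data : List (List String)) (types : List String) (year : String) (out : List (String × Int)) : Prop := out = freq_data_alt data types year
instance (data : List (List String)) (types : List String) (year : String) (out : List (String × Int)) : Decidable (Spec_freq_data data types year out) := by unfold Spec_freq_data; infer_instance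

-- ===== CLAIM (what is proved, stated in full; the proofs are below) =====
def Claim_equal_freq_data : Prop := ∀ (data : List (List String)) (types : List String) (year : String), Dom_freq_data data types year → Pre_freq_data data types year → Spec_freq_data data types year (freq_data data types year)

-- ===== LEMMAS AND PROOFS =====

-- A's inner loop over indices counts the rows matching (type, year).
theorem freqA_eq_countP (data : List (List String)) (t year : String) :
    (PySem.List.pyRange 0 data.length 1).foldl (fun f i =>
        if PySem.List.pyGetD (PySem.List.pyGetD data i []) 2 "" == t && year == PySem.List.pyGetD (PySem.List.pyGetD data i []) 1 "" then f + 1 else f) 0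
      = (data.countP (fun row => PySem.List.pyGetD row 1 "" == year && PySem.List.pyGetD row 2 "" == t) : Int) := by
  have h1 :
      (PySem.List.pyRange 0 data.length 1).foldl (fun f i =>
          if PySem.List.pyGetD (PySem.List.pyGetD data i []) 2 "" == t && year == PySem.List.pyGetD (PySem.List.pyGetD data i []) 1 "" then f + 1 else f) 0
        = data.foldl (fun (f : Int) row =>
            if PySem.List.pyGetD row 2 "" == t && year == PySem.List.pyGetD row 1 "" then f + 1 else f) 0 :=
    PySem.List.foldl_pyRange_zero_pyGetD' data []
      (fun (f : Int) row => if PySem.List.pyGetD row 2 "" == t && year == PySem.List.pyGetD row 1 "" then f + 1 else f) 0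
  rw [h1]
  rw [PySem.List.foldl_congr_mem (g := fun (f : Int) row =>
        if PySem.List.pyGetD row 1 "" == year && PySem.List.pyGetD row 2 "" == t then f + 1 else f)]
  · rw [PySem.List.foldl_count_if]; omega
  · intro acc row _
    have : (PySem.List.pyGetD row 2 "" == t && year == PySem.List.pyGetD row 1 "")
        = (PySem.List.pyGetD row 1 "" == year && PySem.List.pyGetD row 2 "" == t) := by
      rw [Bool.and_comm, Bool.beq_comm]
    rw [this]

-- B's counting pass: the count read off for t is the number of rows matching (t, year).
theorem countsB_getD (data : List (List String)) (t year : String)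
    (c : PySem.Dict String Int) :
    (data.foldl (fun c row =>
        if PySem.List.pyGetD row 1 "" == year then
          let k := PySem.List.pyGetD row 2 ""
          c.insert k (c.getD k 0 + 1)
        else c) c).getD t 0
      = c.getD t 0 + (data.countP (fun row => PySem.List.pyGetD row 1 "" == year && PySem.List.pyGetD row 2 "" == t) : Int) := by
  induction data generalizing c with
  | nil => simp
  | cons row rest ih =>
    simp only [List.foldl_cons]
    by_cases hy : (PySem.List.pyGetD row 1 "" == year) = true
    · rw [if_pos hy, ih, PySem.Dict.getD_insert]
      by_cases ht : t = PySem.List.pyGetD row 2 ""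
      · subst ht
        rw [if_pos rfl, List.countP_cons_of_pos (by simp [hy])]
        push_cast; ring
      · rw [if_neg ht, List.countP_cons_of_neg (by simp [hy]; simpa [beq_iff_eq, eq_comm] using ht)]
    · rw [if_neg hy, ih, List.countP_cons_of_neg (by simp [eq_false_of_ne_true hy])]

-- ===== VERDICT (by name: the statement is the Claim_ definition above) =====
theorem freq_data_spec : Claim_equal_freq_data := by
  intro data types year _ _
  unfold Spec_freq_data freq_data freq_data_alt
  congr 1
  apply PySem.List.foldl_congr_mem
  intro d t _
  rw [freqA_eq_countP, countsB_getD]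
  simp [PySem.Dict.getD_empty]
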